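-- pv_equiv track=rewrite | github.com/skni-kod/TournamentAppBackend | Api/views.py | przetasowanie
-- ===== SOURCE A (Python) =====
-- def przetasowanie(lista):
--     wynik = [lista[0]]
--     for n in range(len(lista) - 1):
--         if n == 0:
--             wynik.append(lista[-1])
--         else:
--             wynik.append(lista[n])
--     return wynik
-- ===== SOURCE B (Python) =====
-- def przetasowanie(lista):
--     if len(lista) == 1:
--         return [lista[0]]
--     return [lista[0], lista[-1]] + lista[1:-1]
-- ===== Notes on version B (the rewrite author's own statement) =====
-- stated objective: idiomatic
-- what changed: Replaces the indexed append-loop with a closed-form assembly from the head, the last element, and the interior slice lista[1:-1].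
import Mathlib
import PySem

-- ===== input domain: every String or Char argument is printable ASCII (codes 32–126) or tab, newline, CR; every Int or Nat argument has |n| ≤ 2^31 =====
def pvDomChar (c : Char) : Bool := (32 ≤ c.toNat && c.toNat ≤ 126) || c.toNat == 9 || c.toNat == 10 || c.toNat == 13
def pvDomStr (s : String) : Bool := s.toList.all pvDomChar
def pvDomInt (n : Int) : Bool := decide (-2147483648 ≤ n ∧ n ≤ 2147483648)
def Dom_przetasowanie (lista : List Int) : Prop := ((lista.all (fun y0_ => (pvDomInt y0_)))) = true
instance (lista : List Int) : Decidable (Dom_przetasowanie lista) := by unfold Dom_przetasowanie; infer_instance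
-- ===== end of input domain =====

-- B replaces A's indexed append-loop by a closed-form assembly [head, last] ++ interior slice (idiomatic; same cost).

-- ===== PORT A =====
def przetasowanie (lista : List Int) : List Int :=
  let wynik := [PySem.List.pyGetD lista 0 0]
  (PySem.List.pyRange 0 ((lista.length : Int) - 1) 1).foldl
    (fun wynik n =>
      if n == 0 then wynik ++ [PySem.List.pyGetD lista (-1) 0]
      else wynik ++ [PySem.List.pyGetD lista n 0]) wynik

-- ===== PORT B =====
def przetasowanie_alt (lista : List Int) : List Int :=
  if lista.length == 1 then [PySem.List.pyGetD lista 0 0]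
  else [PySem.List.pyGetD lista 0 0, PySem.List.pyGetD lista (-1) 0]
        ++ PySem.List.slice lista (some 1) (some (-1))

-- ===== PRECONDITION & SPEC =====
-- Pre_ excludes exactly the empty list, on which Python A raises IndexError (lista[0]).
def Pre_przetasowanie (lista : List Int) : Prop := lista ≠ []
instance (lista : List Int) : Decidable (Pre_przetasowanie lista) := by unfold Pre_przetasowanie; infer_instance
def pvWitness_przetasowanie : List Int := [3, 1, 4, 1, 5]

def Spec_przetasowanie (lista : List Int) (out : List Int) : Prop := out = przetasowanie_alt lista
instance (lista : List Int) (out : List Int) : Decidable (Spec_przetasowanie lista out) := by unfold Spec_przetasowanie; infer_instance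

-- ===== CLAIM (what is proved, stated in full; the proofs are below) =====
def Claim_equal_przetasowanie : Prop := ∀ (lista : List Int), Dom_przetasowanie lista → Pre_przetasowanie lista → Spec_przetasowanie lista (przetasowanie lista)

-- ===== LEMMAS AND PROOFS =====

-- A's loop body on the range 1..L-1 always takes the else branch and appends lista[n]
lemma przet_loop_tail (lista : List Int) (init : List Int) :
    (PySem.List.pyRange 1 ((lista.length : Int) - 1) 1).foldl
      (fun wynik n =>
        if n == 0 then wynik ++ [PySem.List.pyGetD lista (-1) 0]
        else wynik ++ [PySem.List.pyGetD lista n 0]) init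
    = init ++ (PySem.List.pyRange 1 ((lista.length : Int) - 1) 1).map
        (fun n => PySem.List.pyGetD lista n 0) := by
  rw [PySem.List.foldl_congr_mem
      (g := fun wynik n => wynik ++ [PySem.List.pyGetD lista n 0])]
  · exact PySem.List.foldl_append_singleton_eq_map _ _ _
  · intro acc n hn
    have h := (PySem.List.mem_pyRange_one.mp hn).1
    have : ¬ (n == 0) = true := by simp; omega
    simp [this]

-- the mapped interior range is the slice lista[1:-1]
lemma przet_map_interior (lista : List Int) (h : 2 ≤ lista.length) :
    (PySem.List.pyRange 1 ((lista.length : Int) - 1) 1).map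
        (fun n => PySem.List.pyGetD lista n 0)
    = (lista.drop 1).take (lista.length - 2) := by
  have hsplit : PySem.List.pyRange 1 (lista.length : Int) 1
      = PySem.List.pyRange 1 ((lista.length : Int) - 1) 1 ++ [(lista.length : Int) - 1] := by
    have := PySem.List.pyRange_one_succ_right (a := 1) (b := (lista.length : Int) - 1) (by omega)
    simpa [sub_add_cancel] using this
  have hfull : (PySem.List.pyRange 1 (lista.length : Int) 1).map
      (fun n => PySem.List.pyGetD lista n 0) = lista.drop 1 := by
    simpa using PySem.List.map_pyGetD_pyRange (xs := lista) (a := 1) (d := 0) (by omega)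
  rw [hsplit, List.map_append] at hfull
  have hlen : ((PySem.List.pyRange 1 ((lista.length : Int) - 1) 1).map
      (fun n => PySem.List.pyGetD lista n 0)).length = lista.length - 2 := by
    simp [PySem.List.length_pyRange_one]
    omega
  calc (PySem.List.pyRange 1 ((lista.length : Int) - 1) 1).map
        (fun n => PySem.List.pyGetD lista n 0)
      = (((PySem.List.pyRange 1 ((lista.length : Int) - 1) 1).map
          (fun n => PySem.List.pyGetD lista n 0)) ++
          [((lista.length : Int) - 1)].map (fun n => PySem.List.pyGetD lista n 0)).take
          (lista.length - 2) := by
        rw [List.take_append_of_le_length (by omega)]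
        rw [List.take_of_length_le (by omega)]
    _ = (lista.drop 1).take (lista.length - 2) := by rw [hfull]

-- B's slice lista[1:-1] is the interior take/drop
lemma przet_slice (lista : List Int) (h : 2 ≤ lista.length) :
    PySem.List.slice lista (some 1) (some (-1)) = (lista.drop 1).take (lista.length - 2) := by
  have hne : lista ≠ [] := by intro e; simp [e] at h
  simp [PySem.List.slice, PySem.List.clampIdx, hne]
  congr 1
  · omega
  · simp [List.drop_one, Nat.min_eq_left (by omega : 1 ≤ lista.length)]

-- ===== VERDICT (by name: the statement is the Claim_ definition above) =====
theorem przetasowanie_spec : Claim_equal_przetasowanie := by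
  intro lista _ hpre
  unfold Spec_przetasowanie przetasowanie przetasowanie_alt
  by_cases hone : lista.length = 1
  · have : ((lista.length : Int) - 1) = 0 := by omega
    simp [hone]
  · have hlen2 : 2 ≤ lista.length := by
      have : lista.length ≠ 0 := by simpa [List.length_eq_zero_iff] using hpre
      omega
    have hne1 : ¬ (lista.length == 1) = true := by simp; omega
    rw [PySem.List.pyRange_one_cons (by omega)]
    simp only [List.foldl_cons, if_pos (by decide : ((0:Int) == 0) = true), zero_add]
    rw [przet_loop_tail, przet_map_interior lista hlen2, przet_slice lista hlen2]
    simp [hne1]
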